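-- pv_equiv track=rewrite | github.com/ryan-gang/advent-of-code | 2015/5.py | check_prohibited_substrings
-- ===== SOURCE A (Python) =====
-- from typing import Generator
--
-- RESTRICTED = set(["ab", "cd", "pq", "xy"])
--
-- def generate_consecutive_substrings(string: str, length: int) -> Generator[str, None, None]:
--     # Type hints are : Generator[yield_type, send_type, return_type]
--     for i in range(len(string) - (length - 1)):
--         yield string[i : i + length]
--
-- def check_prohibited_substrings(string: str) -> bool:
--     substrings = generate_consecutive_substrings(string, length=2)
--     flag = True
--     for substring in substrings:
--         if substring in RESTRICTED:
--             flag = False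
--             break
--     return flag
-- ===== SOURCE B (Python) =====
-- RESTRICTED = set(["ab", "cd", "pq", "xy"])
--
-- def check_prohibited_substrings(string: str) -> bool:
--     for bad in ("ab", "cd", "pq", "xy"):
--         if bad in string:
--             return False
--     return True
-- ===== Notes on version B (the rewrite author's own statement) =====
-- stated objective: idiomatic
-- what changed: Instead of generating every consecutive 2-character window of the string and testing set membership per position, B loops over the four prohibited patterns and tests each with a whole-string substring containment check, returning False on the first hit.
import Mathlib
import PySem

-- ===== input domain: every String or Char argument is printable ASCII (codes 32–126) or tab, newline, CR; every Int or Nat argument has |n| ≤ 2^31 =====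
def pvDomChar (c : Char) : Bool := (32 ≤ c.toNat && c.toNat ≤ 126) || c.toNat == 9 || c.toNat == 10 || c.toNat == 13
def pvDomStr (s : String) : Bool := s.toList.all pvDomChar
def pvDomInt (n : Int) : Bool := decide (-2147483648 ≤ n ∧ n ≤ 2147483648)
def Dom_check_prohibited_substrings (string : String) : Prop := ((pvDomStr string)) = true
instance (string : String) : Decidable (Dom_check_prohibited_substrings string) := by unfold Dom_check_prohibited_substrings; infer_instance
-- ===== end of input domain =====

-- B iterates over the four prohibited patterns with whole-string containment instead of sliding a 2-char window over positions (idiomatic; return value only).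
-- ===== PORT A =====
def RESTRICTED : PySem.Set String := PySem.Set.ofList ["ab", "cd", "pq", "xy"]

def generate_consecutive_substrings (string : String) (length : Int) : List String :=
  (PySem.List.pyRange 0 (PySem.Str.len string - (length - 1)) 1).map
    (fun i => PySem.Str.slice string (some i) (some (i + length)))

-- A's for-loop with break over the generated substrings
def pvLoopA : List String → Bool
  | [] => true
  | sub :: rest => if PySem.Set.contains RESTRICTED sub then false else pvLoopA rest

def check_prohibited_substrings (string : String) : Bool :=
  pvLoopA (generate_consecutive_substrings string 2)

-- ===== PORT B =====
-- B's for-loop over the four patterns, early return on 'bad in string'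
def pvLoopB (string : String) : List String → Bool
  | [] => true
  | bad :: rest => if PySem.Str.isIn bad string then false else pvLoopB string rest

def check_prohibited_substrings_alt (string : String) : Bool :=
  pvLoopB string ["ab", "cd", "pq", "xy"]

-- ===== PRECONDITION & SPEC =====
def Spec_check_prohibited_substrings (string : String) (out : Bool) : Prop := out = check_prohibited_substrings_alt string
instance (string : String) (out : Bool) : Decidable (Spec_check_prohibited_substrings string out) := by unfold Spec_check_prohibited_substrings; infer_instance

-- ===== CLAIM =====
def Claim_equal_check_prohibited_substrings : Prop := ∀ (string : String), Dom_check_prohibited_substrings string → Spec_check_prohibited_substrings string (check_prohibited_substrings string)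

-- ===== LEMMAS AND PROOFS =====
theorem pvLoopA_eq_true_iff (l : List String) :
    pvLoopA l = true ↔ ∀ w ∈ l, PySem.Set.contains RESTRICTED w = false := by
  induction l with
  | nil => simp [pvLoopA]
  | cons x xs ih =>
    by_cases h : PySem.Set.contains RESTRICTED x = true
    · rw [pvLoopA, if_pos h]
      constructor
      · intro hf; cases hf
      · intro hall
        rw [hall x (List.mem_cons_self)] at h; cases h
    · have h' : PySem.Set.contains RESTRICTED x = false := by simpa using h
      rw [pvLoopA, if_neg (by simp_all), ih]
      constructor
      · intro hall w hw
        rcases List.mem_cons.1 hw with rfl | hw'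
        · exact h'
        · exact hall w hw'
      · intro hall w hw; exact hall w (List.mem_cons_of_mem _ hw)

theorem pvLoopB_eq_true_iff (s : String) (l : List String) :
    pvLoopB s l = true ↔ ∀ bad ∈ l, PySem.Str.isIn bad s = false := by
  induction l with
  | nil => simp [pvLoopB]
  | cons x xs ih =>
    by_cases h : PySem.Str.isIn x s = true
    · rw [pvLoopB, if_pos h]
      constructor
      · intro hf; cases hf
      · intro hall
        rw [hall x (List.mem_cons_self)] at h; cases h
    · have h' : PySem.Str.isIn x s = false := by simpa using h
      rw [pvLoopB, if_neg (by simpa using h'), ih]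
      constructor
      · intro hall w hw
        rcases List.mem_cons.1 hw with rfl | hw'
        · exact h'
        · exact hall w hw'
      · intro hall w hw; exact hall w (List.mem_cons_of_mem _ hw)

theorem window_toList (s : String) (j : Nat) :
    (PySem.Str.slice s (some (j : Int)) (some ((j : Int) + 2))).toList
      = (s.toList.drop j).take 2 := by
  rw [show ((j : Int) + 2) = ((j : Int) + ((2 : Nat) : Int)) by norm_num]
  simp only [PySem.Str.toList_slice, PySem.Chars.slice_eq_listSlice,
    PySem.List.slice_natCast_add]

-- ===== VERDICT =====
theorem check_prohibited_substrings_spec : Claim_equal_check_prohibited_substrings := by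
  intro s _
  unfold Spec_check_prohibited_substrings check_prohibited_substrings check_prohibited_substrings_alt
  rw [Bool.eq_iff_iff, pvLoopA_eq_true_iff, pvLoopB_eq_true_iff]
  constructor
  · -- no window is restricted → no pattern occurs in s
    intro h bad hbad
    by_contra hIn
    simp only [Bool.not_eq_false] at hIn
    have hinf : bad.toList <:+: s.toList := (PySem.Str.isIn_iff_infix bad s).1 hIn
    obtain ⟨pre, suf, hps⟩ := hinf
    have hbad' : bad = "ab" ∨ bad = "cd" ∨ bad = "pq" ∨ bad = "xy" := by
      simpa using hbad
    have hlen2 : bad.toList.length = 2 := by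
      rcases hbad' with rfl | rfl | rfl | rfl <;> decide
    -- the window at index pre.length equals bad
    set j := pre.length with hj
    have hprefix : bad.toList <+: s.toList.drop j := by
      refine ⟨suf, ?_⟩
      rw [hj, ← hps, List.append_assoc, List.drop_left]
    have htake : (s.toList.drop j).take 2 = bad.toList := by
      rw [← hlen2]
      exact (List.prefix_iff_eq_take.1 hprefix).symm
    have hjlt : (j : Int) < PySem.Str.len s - 1 := by
      have h2 : j + 2 ≤ s.toList.length := by
        have hle := hprefix.length_le
        rw [List.length_drop] at hle
        omega
      simp only [PySem.Str.len_eq]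
      omega
    have hmem : (PySem.Str.slice s (some (j : Int)) (some ((j : Int) + 2)))
        ∈ generate_consecutive_substrings s 2 := by
      unfold generate_consecutive_substrings
      refine List.mem_map.2 ⟨(j : Int), ?_, rfl⟩
      rw [PySem.List.mem_pyRange_one]
      constructor
      · exact_mod_cast Int.natCast_nonneg j
      · simpa using hjlt
    have := h _ hmem
    have hwin : (PySem.Str.slice s (some (j : Int)) (some ((j : Int) + 2))) = bad := by
      apply String.toList_inj.1
      rw [window_toList, htake]
    rw [hwin] at this
    have hmemR : bad ∈ RESTRICTED := by
      rcases hbad' with rfl | rfl | rfl | rfl <;> decide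
    rw [(PySem.Set.contains_iff RESTRICTED bad).2 hmemR] at this
    simp at this
  · -- no pattern occurs → no window is restricted
    intro h w hw
    by_contra hC
    simp only [Bool.not_eq_false] at hC
    have hwR : w ∈ RESTRICTED := (PySem.Set.contains_iff RESTRICTED w).1 hC
    have hwL : w ∈ (["ab", "cd", "pq", "xy"] : List String) := by
      have : RESTRICTED = ["ab", "cd", "pq", "xy"] := by decide
      rwa [this] at hwR
    -- w is a window of s, hence an infix of s
    unfold generate_consecutive_substrings at hw
    obtain ⟨i, hi, hwe⟩ := List.mem_map.1 hw
    rw [PySem.List.mem_pyRange_one] at hi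
    obtain ⟨hi0, _⟩ := hi
    obtain ⟨j, hj⟩ := Int.eq_ofNat_of_zero_le hi0
    subst hj
    have hwl : w.toList = (s.toList.drop j).take 2 := by
      rw [← hwe, window_toList]
    have hinf : w.toList <:+: s.toList :=
      (hwl ▸ (List.take_prefix 2 (s.toList.drop j)).isInfix).trans
        (List.drop_suffix j s.toList).isInfix
    have : PySem.Str.isIn w s = true := (PySem.Str.isIn_iff_infix w s).2 hinf
    have := h w hwL
    simp_all
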